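-- pv_equiv track=rewrite | github.com/satishkumar34/rftinternship | Day1.py | clean_and_sort
-- ===== SOURCE A (Python) =====
-- def clean_and_sort(lst):
--     seen = set()
--     result = []
--
--     for item in lst:
--         if item is not None and item != "" and item not in seen:
--             seen.add(item)
--             result.append(item)
--
--     return sorted(result)
-- ===== SOURCE B (Python) =====
-- def clean_and_sort(lst):
--     ordered = sorted(x for x in lst if x is not None and x != "")
--     out = []
--     for x in ordered:
--         if not out or out[-1] != x:
--             out.append(x)
--     return out
-- ===== Notes on version B (the rewrite author's own statement) =====
-- stated objective: idiomatic
-- what changed: B sorts the filtered list first and removes consecutive duplicates in one adjacency pass, instead of A's hash-set first-occurrence dedup followed by sorting.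
import Mathlib
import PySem

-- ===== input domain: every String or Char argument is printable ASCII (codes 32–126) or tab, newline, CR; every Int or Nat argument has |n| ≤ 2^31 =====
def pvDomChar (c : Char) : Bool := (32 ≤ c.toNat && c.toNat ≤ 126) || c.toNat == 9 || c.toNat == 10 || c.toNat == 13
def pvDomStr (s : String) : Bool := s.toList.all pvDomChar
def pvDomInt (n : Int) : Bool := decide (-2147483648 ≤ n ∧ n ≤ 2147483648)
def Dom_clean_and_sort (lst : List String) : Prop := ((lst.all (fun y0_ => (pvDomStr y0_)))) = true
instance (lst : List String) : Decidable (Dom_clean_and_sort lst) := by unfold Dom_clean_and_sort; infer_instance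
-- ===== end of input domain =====

-- B replaces A's hash-set first-occurrence dedup + sort by sort-then-adjacent-dedup (idiomatic; same cost).

-- ===== PORT A =====
-- seen/result loop: seen is a Python set, result the list of first occurrences; then sorted(result)
def clean_and_sort (lst : List String) : List String :=
  let st := lst.foldl
    (fun (acc : PySem.Set String × List String) item =>
      if item ≠ "" ∧ ¬ (PySem.Set.contains acc.1 item = true) then
        (PySem.Set.add acc.1 item, acc.2 ++ [item])
      else acc)
    (PySem.Set.empty, [])
  PySem.List.sorted st.2 (fun x => x) false

-- ===== PORT B =====
-- sort the filtered list, then one adjacency pass: append x unless out[-1] == x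
def clean_and_sort_alt (lst : List String) : List String :=
  let ordered := PySem.List.sorted (lst.filter (fun x => x ≠ "")) (fun x => x) false
  ordered.foldl (fun out x => if out = [] ∨ out.getLast? ≠ some x then out ++ [x] else out) []

-- ===== PRECONDITION & SPEC =====
def Spec_clean_and_sort (lst : List String) (out : List String) : Prop := out = clean_and_sort_alt lst
instance (lst : List String) (out : List String) : Decidable (Spec_clean_and_sort lst out) := by unfold Spec_clean_and_sort; infer_instance

-- ===== CLAIM (what is proved, stated in full; the proofs are below) =====
def Claim_equal_clean_and_sort : Prop := ∀ (lst : List String), Dom_clean_and_sort lst → Spec_clean_and_sort lst (clean_and_sort lst)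

-- ===== LEMMAS AND PROOFS =====

-- A's loop: the running pair is always (r, r) and r is the Set.add-fold over the filtered prefix.
theorem pvA_fold (lst : List String) (s : List String) :
    lst.foldl
      (fun (acc : PySem.Set String × List String) item =>
        if item ≠ "" ∧ ¬ (PySem.Set.contains acc.1 item = true) then
          (PySem.Set.add acc.1 item, acc.2 ++ [item])
        else acc)
      (s, s)
    = ((lst.filter (fun x => x ≠ "")).foldl PySem.Set.add s,
       (lst.filter (fun x => x ≠ "")).foldl PySem.Set.add s) := by
  induction lst generalizing s with
  | nil => rfl
  | cons x t ih =>
    rw [List.foldl_cons, List.filter_cons]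
    by_cases hx : x = ""
    · rw [if_neg (by simp [hx]), if_neg (by simp [hx])]
      exact ih s
    · by_cases hc : PySem.Set.contains s x = true
      · have hmem : x ∈ s := (PySem.Set.contains_iff s x).1 hc
        have hadd : PySem.Set.add s x = s := by
          simp [PySem.Set.add, hmem]
        rw [if_neg (fun h => h.2 hc), if_pos (by simp [hx]), List.foldl_cons, hadd]
        exact ih s
      · have hmem : x ∉ s := fun h => hc ((PySem.Set.contains_iff s x).2 h)
        have hadd : PySem.Set.add s x = s ++ [x] := by
          simp [PySem.Set.add, hmem]
        rw [if_pos ⟨hx, hc⟩, if_pos (by simp [hx]), List.foldl_cons, hadd]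
        exact ih (s ++ [x])

-- every element of a ≤-sorted list is ≤ its last element
theorem pvLe_getLast {α : Type} [LinearOrder α] :
    ∀ (l : List α), l.Pairwise (· ≤ ·) → ∀ a ∈ l, ∃ m, l.getLast? = some m ∧ a ≤ m := by
  intro l
  induction l with
  | nil => intro _ a ha; simp at ha
  | cons x t ih =>
    intro hp a ha
    rcases List.pairwise_cons.1 hp with ⟨hx, ht⟩
    cases t with
    | nil =>
      have hax : a = x := by simpa using ha
      subst hax; exact ⟨a, by simp, le_refl a⟩
    | cons y u =>
      have hlast : (x :: y :: u).getLast? = (y :: u).getLast? := List.getLast?_cons_cons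
      rcases List.mem_cons.1 ha with rfl | ha'
      · rcases ih ht y (by simp) with ⟨m, hm, hym⟩
        exact ⟨m, by rw [hlast]; exact hm, le_trans (hx y (by simp)) hym⟩
      · rcases ih ht a ha' with ⟨m, hm, ham⟩
        exact ⟨m, by rw [hlast]; exact hm, ham⟩

-- the adjacency pass: invariant over the fold
theorem pvAdj_fold {α : Type} [LinearOrder α] [DecidableEq α] :
    ∀ (xs acc : List α), xs.Pairwise (· ≤ ·) → acc.Pairwise (· < ·) →
      (∀ a ∈ acc, ∀ b ∈ xs, a ≤ b) →
      (xs.foldl (fun out x => if out = [] ∨ out.getLast? ≠ some x then out ++ [x] else out) acc).Pairwise (· < ·)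
      ∧ (∀ y, y ∈ xs.foldl (fun out x => if out = [] ∨ out.getLast? ≠ some x then out ++ [x] else out) acc
              ↔ y ∈ acc ∨ y ∈ xs) := by
  intro xs
  induction xs with
  | nil => intro acc _ hacc _; simpa using hacc
  | cons x t ih =>
    intro acc hxs hacc hle
    rcases List.pairwise_cons.1 hxs with ⟨hxt, ht⟩
    by_cases hguard : acc = [] ∨ acc.getLast? ≠ some x
    · -- append x
      have hacc' : (acc ++ [x]).Pairwise (· < ·) := by
        refine List.pairwise_append.2 ⟨hacc, by simp, ?_⟩
        intro a ha b hb
        have hbx : b = x := by simpa using hb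
        rw [hbx]
        have halex : a ≤ x := hle a ha x (by simp)
        rcases lt_or_eq_of_le halex with h | h
        · exact h
        · exfalso
          rcases pvLe_getLast acc (hacc.imp le_of_lt) a ha with ⟨m, hm, ham⟩
          rcases hguard with h0 | hg
          · subst h0; simp at ha
          · have ham2 : m ≤ a := by
              rw [h]; exact hle m (List.mem_of_getLast? hm) x (by simp)
            have : a = m := le_antisymm ham ham2
            subst this; rw [h] at hm; exact hg hm
      have hle' : ∀ a ∈ acc ++ [x], ∀ b ∈ t, a ≤ b := by
        intro a ha b hb
        rcases List.mem_append.1 ha with h | h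
        · exact hle a h b (List.mem_cons_of_mem x hb)
        · have : a = x := by simpa using h
          rw [this]; exact hxt b hb
      have hmain := ih (acc ++ [x]) ht hacc' hle'
      constructor
      · rw [List.foldl_cons, if_pos hguard]; exact hmain.1
      · intro y
        rw [List.foldl_cons, if_pos hguard, hmain.2 y]
        simp only [List.mem_append, List.mem_singleton, List.mem_cons]
        tauto
    · -- skip: x is already the last element of acc
      push_neg at hguard
      have hxacc : x ∈ acc := List.mem_of_getLast? hguard.2
      have hle' : ∀ a ∈ acc, ∀ b ∈ t, a ≤ b := fun a ha b hb => hle a ha b (List.mem_cons_of_mem x hb)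
      have hmain := ih acc ht hacc hle'
      have hstep : (if acc = [] ∨ acc.getLast? ≠ some x then acc ++ [x] else acc) = acc := by
        rw [if_neg]; push_neg; exact hguard
      constructor
      · rw [List.foldl_cons, hstep]; exact hmain.1
      · intro y
        rw [List.foldl_cons, hstep, hmain.2 y]
        simp only [List.mem_cons]
        constructor
        · rintro (h | h)
          · exact Or.inl h
          · exact Or.inr (Or.inr h)
        · rintro (h | rfl | h)
          · exact Or.inl h
          · exact Or.inl hxacc
          · exact Or.inr h

-- two strictly increasing lists with the same members are equal
theorem pvChain_ext {α : Type} [LinearOrder α] :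
    ∀ (xs ys : List α), xs.Pairwise (· < ·) → ys.Pairwise (· < ·) →
      (∀ a, a ∈ xs ↔ a ∈ ys) → xs = ys := by
  intro xs
  induction xs with
  | nil =>
    intro ys _ _ hm
    cases ys with
    | nil => rfl
    | cons y t => exact absurd ((hm y).2 (by simp)) (by simp)
  | cons x xt ih =>
    intro ys hx hy hm
    cases ys with
    | nil => exact absurd ((hm x).1 (by simp)) (by simp)
    | cons y yt =>
      rcases List.pairwise_cons.1 hx with ⟨hxlt, hxt⟩
      rcases List.pairwise_cons.1 hy with ⟨hylt, hyt⟩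
      have hxy : x = y := by
        have h1 := (hm x).1 (by simp)
        have h2 := (hm y).2 (by simp)
        rcases List.mem_cons.1 h1 with h | h
        · exact h
        · rcases List.mem_cons.1 h2 with h' | h'
          · exact h'.symm
          · exact absurd (lt_trans (hxlt y h') (hylt x h)) (lt_irrefl x)
      subst hxy
      have hmt : ∀ a, a ∈ xt ↔ a ∈ yt := by
        intro a
        constructor
        · intro ha
          rcases List.mem_cons.1 ((hm a).1 (List.mem_cons_of_mem _ ha)) with h | h
          · exact absurd (h ▸ hxlt a ha) (lt_irrefl a)
          · exact h
        · intro ha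
          rcases List.mem_cons.1 ((hm a).2 (List.mem_cons_of_mem _ ha)) with h | h
          · exact absurd (h ▸ hylt a ha) (lt_irrefl a)
          · exact h
      rw [ih yt hxt hyt hmt]

-- ===== VERDICT (by name: the statement is the Claim_ definition above) =====
theorem clean_and_sort_spec : Claim_equal_clean_and_sort := by
  intro lst _
  unfold Spec_clean_and_sort clean_and_sort clean_and_sort_alt
  have hA := pvA_fold lst []
  have hofl : (lst.filter (fun x => x ≠ "")).foldl PySem.Set.add [] =
      PySem.Set.ofList (lst.filter (fun x => x ≠ "")) := rfl
  rw [hofl] at hA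
  show PySem.List.sorted
      (lst.foldl
        (fun (acc : PySem.Set String × List String) item =>
          if item ≠ "" ∧ ¬ (PySem.Set.contains acc.1 item = true) then
            (PySem.Set.add acc.1 item, acc.2 ++ [item])
          else acc)
        (PySem.Set.empty, [])).2 (fun x => x) false
    = (PySem.List.sorted (lst.filter (fun x => x ≠ "")) (fun x => x) false).foldl
        (fun out x => if out = [] ∨ out.getLast? ≠ some x then out ++ [x] else out) []
  have hempty : (PySem.Set.empty : PySem.Set String) = ([] : List String) := rfl
  rw [hempty, hA]
  have hLp : (PySem.List.sorted (PySem.Set.ofList (lst.filter (fun x => x ≠ ""))) (fun x => x) false).Pairwise (· < ·) :=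
    PySem.List.sorted_ofList_pairwise_lt (lst.filter (fun x => x ≠ ""))
  have hLm : ∀ a, a ∈ PySem.List.sorted (PySem.Set.ofList (lst.filter (fun x => x ≠ ""))) (fun x => x) false
      ↔ a ∈ lst.filter (fun x => x ≠ "") := by
    intro a
    rw [PySem.List.mem_sorted]
    exact PySem.Set.mem_ofList _ _
  have hSp : (PySem.List.sorted (lst.filter (fun x => x ≠ "")) (fun x => x) false).Pairwise (· ≤ ·) := by
    simpa using PySem.List.sorted_pairwise (lst.filter (fun x => x ≠ "")) (fun x => x)
  have hadj := pvAdj_fold (PySem.List.sorted (lst.filter (fun x => x ≠ "")) (fun x => x) false) []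
    hSp (by simp) (by simp)
  have hRm : ∀ a, a ∈ (PySem.List.sorted (lst.filter (fun x => x ≠ "")) (fun x => x) false).foldl
      (fun out x => if out = [] ∨ out.getLast? ≠ some x then out ++ [x] else out) []
      ↔ a ∈ lst.filter (fun x => x ≠ "") := by
    intro a
    rw [hadj.2 a]
    simp [PySem.List.mem_sorted]
  exact pvChain_ext _ _ hLp hadj.1 (fun a => (hLm a).trans (hRm a).symm)
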